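-- pv_equiv track=rewrite | github.com/jhonatacaiob/Jogo-da-forca | forca.py | revelar_letras
-- ===== SOURCE A (Python) =====
-- def revelar_letras(uma_palavra, a_palavra_mostrada, uma_letra):
--
--     uma_palavra_vetor = " ".join(uma_palavra).split(" ")
--     a_palavra_mostrada_vetor = " ".join(a_palavra_mostrada).split(" ")
--
--     indice = 0
--     for i in range(0, uma_palavra_vetor.count(uma_letra)):
--         indice = uma_palavra_vetor.index(uma_letra, indice, len(uma_palavra_vetor))
--         a_palavra_mostrada_vetor[indice] = uma_letra
--         indice += 1
--     return "".join(a_palavra_mostrada_vetor)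
-- ===== SOURCE B (Python) =====
-- def revelar_letras(uma_palavra, a_palavra_mostrada, uma_letra):
--     mostrada = " ".join(a_palavra_mostrada).split(" ")
--     for i, pedaco in enumerate(" ".join(uma_palavra).split(" ")):
--         if pedaco == uma_letra:
--             mostrada[i] = uma_letra
--     return "".join(mostrada)
-- ===== Notes on version B (the rewrite author's own statement) =====
-- stated objective: simpler
-- what changed: A counts the matches and then repeatedly calls .index(letter, indice, len) to find each next match before overwriting it; B keeps the same field decomposition but makes one enumerate pass over the word's fields, overwriting the displayed field at each matching position.
import Mathlib
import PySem

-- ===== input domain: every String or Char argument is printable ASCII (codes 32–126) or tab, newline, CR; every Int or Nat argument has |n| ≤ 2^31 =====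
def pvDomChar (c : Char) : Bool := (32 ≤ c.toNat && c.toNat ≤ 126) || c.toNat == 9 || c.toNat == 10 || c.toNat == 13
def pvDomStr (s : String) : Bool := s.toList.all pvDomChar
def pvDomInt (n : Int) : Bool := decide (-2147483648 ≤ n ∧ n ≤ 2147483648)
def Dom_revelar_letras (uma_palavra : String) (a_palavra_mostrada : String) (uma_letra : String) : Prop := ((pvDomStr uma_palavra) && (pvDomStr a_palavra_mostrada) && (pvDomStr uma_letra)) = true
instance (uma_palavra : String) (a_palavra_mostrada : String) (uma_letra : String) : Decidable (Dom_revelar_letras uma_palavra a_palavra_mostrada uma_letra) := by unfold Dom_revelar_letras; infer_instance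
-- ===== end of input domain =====

-- B replaces A's count-then-repeated-.index(…, start) loop with a single enumerate pass over the
-- same field list, for a simpler one-scan implementation; return values agree wherever A returns.

-- ===== PORT A =====

-- ' '.join(s).split(' '): both Pythons build their field lists with this exact expression
-- (' '.join iterates the string's characters, so parts = s.toList.map [·]; split(' ') = splitOn, sep ≠ '').
def pvFields (s : String) : List (List Char) :=
  PySem.Chars.splitOn (PySem.Chars.join [' '] (s.toList.map (fun c => [c]))) [' ']

-- uma_palavra_vetor.index(uma_letra, indice, len(uma_palavra_vetor)): first index ≥ ind holding l
-- (end bound = the whole list, so searching the drop is exact; none = ValueError).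
def pvIndexFrom (wv : List (List Char)) (l : List Char) (ind : Nat) : Option Nat :=
  (PySem.List.index? (wv.drop ind) l).map (fun r => ind + r)

-- the 'for i in range(0, count)' loop: fuel = the count, indice and the displayed vector as state.
-- On the none branch Python's list.index would raise ValueError; it is unreachable (fuel = number of
-- remaining occurrences), and list assignment out of range (Python IndexError) is excluded by Pre_,
-- so the total PySem.List.pySetD is used.
def pvLoopA (wv : List (List Char)) (l : List Char) : Nat → Nat → List (List Char) → List (List Char)
  | 0, _, mv => mv
  | k + 1, ind, mv =>
    match pvIndexFrom wv l ind with
    | none => mv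
    | some j => pvLoopA wv l k (j + 1) (PySem.List.pySetD mv (j : Int) l)

def revelar_letras (uma_palavra : String) (a_palavra_mostrada : String) (uma_letra : String) : String :=
  let wv := pvFields uma_palavra
  let mv := pvFields a_palavra_mostrada
  String.ofList (PySem.Chars.join [] (pvLoopA wv uma_letra.toList (wv.count uma_letra.toList) 0 mv))

-- ===== PORT B =====
-- for i, pedaco in enumerate(' '.join(uma_palavra).split(' ')): if pedaco == uma_letra: mostrada[i] = uma_letra
-- (list assignment out of range raises in Python — excluded by Pre_ — so pySetD is used).
def revelar_letras_alt (uma_palavra : String) (a_palavra_mostrada : String) (uma_letra : String) : String :=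
  let mostrada :=
    (PySem.List.enumerate (pvFields uma_palavra)).foldl
      (fun r p => if p.2 == uma_letra.toList then PySem.List.pySetD r p.1 uma_letra.toList else r)
      (pvFields a_palavra_mostrada)
  String.ofList (PySem.Chars.join [] mostrada)

-- ===== PRECONDITION & SPEC =====
-- Pre_ excludes exactly the inputs where both Pythons raise IndexError: a field of the word equal to
-- uma_letra at a position not below the displayed word's field count (the list assignment is out of range).
def Pre_revelar_letras (uma_palavra : String) (a_palavra_mostrada : String) (uma_letra : String) : Prop :=
  uma_letra.toList ∉ (pvFields uma_palavra).drop (pvFields a_palavra_mostrada).length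
instance (uma_palavra : String) (a_palavra_mostrada : String) (uma_letra : String) : Decidable (Pre_revelar_letras uma_palavra a_palavra_mostrada uma_letra) := by unfold Pre_revelar_letras; infer_instance

def pvWitness_revelar_letras : String × String × String := ("banana", "b_n_n_", "a")

def Spec_revelar_letras (uma_palavra : String) (a_palavra_mostrada : String) (uma_letra : String) (out : String) : Prop := out = revelar_letras_alt uma_palavra a_palavra_mostrada uma_letra
instance (uma_palavra : String) (a_palavra_mostrada : String) (uma_letra : String) (out : String) : Decidable (Spec_revelar_letras uma_palavra a_palavra_mostrada uma_letra out) := by unfold Spec_revelar_letras; infer_instance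

-- ===== CLAIM (what is proved, stated in full; the proofs are below) =====
def Claim_equal_revelar_letras : Prop := ∀ (uma_palavra : String) (a_palavra_mostrada : String) (uma_letra : String), Dom_revelar_letras uma_palavra a_palavra_mostrada uma_letra → Pre_revelar_letras uma_palavra a_palavra_mostrada uma_letra → Spec_revelar_letras uma_palavra a_palavra_mostrada uma_letra (revelar_letras uma_palavra a_palavra_mostrada uma_letra)

-- ===== LEMMAS AND PROOFS =====

-- A's loop, run with fuel = the number of occurrences of l in the part of wv not yet scanned,
-- performs exactly the sets of B's single enumerate pass over that part.
theorem pvLoopA_eq_foldl (wv : List (List Char)) (l : List Char) :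
    ∀ (s : List (List Char)) (ind : Nat) (mv : List (List Char)), s = wv.drop ind →
      pvLoopA wv l (s.count l) ind mv =
        (PySem.List.enumerate s (ind : Int)).foldl
          (fun r p => if p.2 == l then PySem.List.pySetD r p.1 l else r) mv := by
  intro s
  induction s with
  | nil => intro ind mv _; simp [pvLoopA, PySem.List.enumerate_nil]
  | cons x t ih =>
    intro ind mv h
    have ht : t = wv.drop (ind + 1) := by
      have h2 : (wv.drop ind).tail = wv.drop (ind + 1) := List.tail_drop
      rw [← h] at h2; simpa using h2
    by_cases hx : x = l
    · subst hx
      have hcount : (x :: t).count x = t.count x + 1 := by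
        simp
      have hidx : pvIndexFrom wv x ind = some ind := by
        rw [pvIndexFrom, ← h, PySem.List.index?_cons_self]
        simp
      rw [hcount]
      show pvLoopA wv x (t.count x + 1) ind mv = _
      rw [pvLoopA, hidx]
      show pvLoopA wv x (t.count x) (ind + 1) (PySem.List.pySetD mv (ind : Int) x) = _
      rw [ih (ind + 1) (PySem.List.pySetD mv (ind : Int) x) ht]
      rw [PySem.List.enumerate_cons]
      simp only [List.foldl_cons, beq_self_eq_true]
      norm_cast
    · have hcount : (x :: t).count l = t.count l := by
        simp [hx]
      have hidx : pvIndexFrom wv l ind = pvIndexFrom wv l (ind + 1) := by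
        unfold pvIndexFrom
        rw [← ht, ← h]
        rw [PySem.List.index?_cons_of_ne t hx]
        cases PySem.List.index? t l with
        | none => rfl
        | some r => simp; omega
      have hskip : ∀ k, pvLoopA wv l k ind mv = pvLoopA wv l k (ind + 1) mv := by
        intro k
        cases k with
        | zero => rfl
        | succ k' =>
          show (match pvIndexFrom wv l ind with
                | none => mv
                | some j => pvLoopA wv l k' (j + 1) (PySem.List.pySetD mv (j : Int) l)) = _
          rw [hidx]; rfl
      rw [hcount, hskip, ih (ind + 1) mv ht, PySem.List.enumerate_cons]
      have hbeq : (x == l) = false := by simp [hx]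
      simp only [List.foldl_cons, hbeq, Bool.false_eq_true, if_false]
      norm_cast

-- ===== VERDICT (by name: the statement is the Claim_ definition above) =====
theorem revelar_letras_spec : Claim_equal_revelar_letras := by
  unfold Claim_equal_revelar_letras
  intro w m l _ _
  unfold Spec_revelar_letras revelar_letras revelar_letras_alt
  have h := pvLoopA_eq_foldl (pvFields w) l.toList (pvFields w) 0 (pvFields m) (by simp)
  simp only []
  rw [h]
  norm_cast
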